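-- pv_equiv track=rewrite | github.com/NOAA-PMEL/faire-to-ncbi-converter | utils/ncbi_mapper.py | get_additional_faire_unit_cols_dict
-- ===== SOURCE A (Python) =====
-- def get_additional_faire_unit_cols_dict(faire_cols: list) -> dict:
--     # Creates a dictionary of the additional faire_cols with that have corresponding unit cols and creates a dict with faire col as key and unit col as value
--     unit_col_dict = {}
--     for col in faire_cols:
--         unit_col = f"{col}_unit"
--         units_col = f"{col}_units"
--         if unit_col in faire_cols:
--             unit_col_dict[col] = unit_col
--         if units_col in faire_cols:
--             unit_col_dict[col] = units_col
--
--     # remove columns from list that exist in dictionary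
--     to_remove = set(unit_col_dict.keys())
--     to_remove.update(unit_col_dict.values())
--     filtered_faire_list = [col for col in faire_cols if col not in to_remove]
--
--     return unit_col_dict, filtered_faire_list
-- ===== SOURCE B (Python) =====
-- def get_additional_faire_unit_cols_dict(faire_cols: list) -> dict:
--     # Reverse-index algorithm: one pass records each column's first-occurrence
--     # index; suffix passes over the unit columns map them back to their base
--     # ('_units' pass second so it wins); a sort on first-occurrence index
--     # recovers the key order; then the same filter phase.
--     pos = {}
--     for i, col in enumerate(faire_cols):
--         pos.setdefault(col, i)
--
--     base_to_unit = {}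
--     for col in faire_cols:
--         if col.endswith("_unit") and col[:-5] in pos:
--             base_to_unit[col[:-5]] = col
--     for col in faire_cols:
--         if col.endswith("_units") and col[:-6] in pos:
--             base_to_unit[col[:-6]] = col
--
--     unit_col_dict = dict(sorted(base_to_unit.items(), key=lambda kv: pos[kv[0]]))
--     to_remove = set(unit_col_dict) | set(unit_col_dict.values())
--     filtered_faire_list = [col for col in faire_cols if col not in to_remove]
--     return unit_col_dict, filtered_faire_list
-- ===== Notes on version B (the rewrite author's own statement) =====
-- stated objective: faster
-- what changed: Instead of probing the column list for each constructed candidate name col+'_unit'/col+'_units', B recognises unit columns by their suffix, strips it to recover the base (two passes so '_units' wins), and reconstructs A's key order by sorting the base->unit pairs on a first-occurrence index built in one enumerate pass.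
import Mathlib
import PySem

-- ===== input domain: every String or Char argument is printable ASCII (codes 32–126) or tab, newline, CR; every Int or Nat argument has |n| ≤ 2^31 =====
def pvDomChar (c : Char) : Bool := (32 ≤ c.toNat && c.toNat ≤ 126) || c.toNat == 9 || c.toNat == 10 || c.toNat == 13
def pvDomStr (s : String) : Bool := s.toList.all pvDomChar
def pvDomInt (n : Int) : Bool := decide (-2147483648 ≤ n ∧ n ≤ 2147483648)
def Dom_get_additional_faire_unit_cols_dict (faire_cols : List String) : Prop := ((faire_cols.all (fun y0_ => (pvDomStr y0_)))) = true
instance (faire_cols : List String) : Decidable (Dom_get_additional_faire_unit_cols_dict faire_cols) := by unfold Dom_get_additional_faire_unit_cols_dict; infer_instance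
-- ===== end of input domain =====

-- B replaces A's per-column list-membership probes by a reverse suffix index plus a sort on
-- first-occurrence position that recovers A's key order (measured faster in a timing run).

-- f"{col}{suffix}": exact code-point concatenation (kernel-friendly, unlike String.append)
def pvCat (a b : String) : String := String.ofList (a.toList ++ b.toList)

-- ===== PORT A =====
def get_additional_faire_unit_cols_dict (faire_cols : List String) : (List (String × String)) × List String :=
  let unit_col_dict : PySem.Dict String String := faire_cols.foldl (fun d col =>
    let unit_col := pvCat col "_unit"
    let units_col := pvCat col "_units"
    let d := if faire_cols.contains unit_col then d.insert col unit_col else d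
    if faire_cols.contains units_col then d.insert col units_col else d) PySem.Dict.empty
  let to_remove := PySem.Set.update (PySem.Set.ofList unit_col_dict.keys) unit_col_dict.values
  let filtered_faire_list := faire_cols.filter (fun col => !(PySem.Set.contains to_remove col))
  (unit_col_dict.items, filtered_faire_list)

-- ===== PORT B =====
def get_additional_faire_unit_cols_dict_alt (faire_cols : List String) : (List (String × String)) × List String :=
  -- pos: first-occurrence index of every column
  let pos : PySem.Dict String Int := (PySem.List.enumerate faire_cols).foldl
    (fun d p => d.setdefault p.2 p.1) PySem.Dict.empty
  -- '_unit' suffix pass, then '_units' pass (which overwrites, so '_units' wins)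
  let m1 : PySem.Dict String String := faire_cols.foldl (fun d col =>
    if PySem.Str.endswith col "_unit" && pos.contains (PySem.Str.slice col none (some (-5))) then
      d.insert (PySem.Str.slice col none (some (-5))) col else d) PySem.Dict.empty
  let base_to_unit : PySem.Dict String String := faire_cols.foldl (fun d col =>
    if PySem.Str.endswith col "_units" && pos.contains (PySem.Str.slice col none (some (-6))) then
      d.insert (PySem.Str.slice col none (some (-6))) col else d) m1
  -- pos[kv[0]] ported as getD: exact here, every key of base_to_unit is a key of pos
  let unit_col_dict : PySem.Dict String String :=
    PySem.Dict.ofList (PySem.List.sorted base_to_unit.items (fun kv => pos.getD kv.1 0))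
  let to_remove := PySem.Set.union (PySem.Set.ofList unit_col_dict.keys)
    (PySem.Set.ofList unit_col_dict.values)
  let filtered_faire_list := faire_cols.filter (fun col => !(PySem.Set.contains to_remove col))
  (unit_col_dict.items, filtered_faire_list)

-- ===== PRECONDITION & SPEC =====
def Spec_get_additional_faire_unit_cols_dict (faire_cols : List String) (out : (List (String × String)) × List String) : Prop := out = get_additional_faire_unit_cols_dict_alt faire_cols
instance (faire_cols : List String) (out : (List (String × String)) × List String) : Decidable (Spec_get_additional_faire_unit_cols_dict faire_cols out) := by unfold Spec_get_additional_faire_unit_cols_dict; infer_instance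

-- ===== CLAIM (what is proved, stated in full; the proofs are below) =====
def Claim_equal_get_additional_faire_unit_cols_dict : Prop := ∀ (faire_cols : List String), Dom_get_additional_faire_unit_cols_dict faire_cols → Spec_get_additional_faire_unit_cols_dict faire_cols (get_additional_faire_unit_cols_dict faire_cols)

-- ===== LEMMAS AND PROOFS =====

-- the condition under which A maps a column, and the value it maps it to
def pvCond (fs : List String) (c : String) : Bool :=
  fs.contains (pvCat c "_unit") || fs.contains (pvCat c "_units")
def pvVal (fs : List String) (c : String) : String :=
  if fs.contains (pvCat c "_units") then pvCat c "_units" else pvCat c "_unit"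

lemma pv_cat_toList (a b : String) : (pvCat a b).toList = a.toList ++ b.toList := by
  simp [pvCat]

-- stripping a suffix recovers the base: (s <:+ t and take gives b) iff t = b ++ s
lemma pv_suffix_strip (t b s : List Char) :
    (s <:+ t ∧ t.take (t.length - s.length) = b) ↔ t = b ++ s := by
  constructor
  · rintro ⟨⟨u, rfl⟩, rfl⟩
    simp
  · rintro rfl
    exact ⟨⟨b, rfl⟩, by simp⟩

-- a string ends with suf and stripping suf yields b  ↔  it is b ++ suf
lemma pv_strip_iff (suf : String) (n : Int) (hn : n = -((suf.toList.length : Int)))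
    (hk : 0 < suf.toList.length) (x b : String) :
    (PySem.Str.endswith x suf = true ∧ PySem.Str.slice x none (some n) = b) ↔ x = pvCat b suf := by
  subst hn
  rw [PySem.Str.endswith_eq, PySem.Chars.endswith_iff]
  constructor
  · rintro ⟨h1, h2⟩
    have h2' : x.toList.take (x.toList.length - suf.toList.length) = b.toList := by
      have := congrArg String.toList h2
      rwa [PySem.Str.toList_slice, PySem.Chars.slice_eq_listSlice,
        PySem.List.slice_to_neg_natCast _ _ hk] at this
    have := (pv_suffix_strip x.toList b.toList suf.toList).mp ⟨h1, h2'⟩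
    apply String.toList_injective
    rw [this, pv_cat_toList]
  · rintro rfl
    have hx : (pvCat b suf).toList = b.toList ++ suf.toList := pv_cat_toList b suf
    obtain ⟨h1, h2⟩ := (pv_suffix_strip (pvCat b suf).toList b.toList suf.toList).mpr hx
    refine ⟨h1, ?_⟩
    apply String.toList_injective
    rw [PySem.Str.toList_slice, PySem.Chars.slice_eq_listSlice,
      PySem.List.slice_to_neg_natCast _ _ hk, h2]

-- A's conditional-double-insert loop is the unconditional insert loop over the kept columns
lemma pv_foldA (fs : List String) : ∀ (l : List String) (d : PySem.Dict String String),
    l.foldl (fun d col =>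
      if fs.contains (pvCat col "_units") then
        (if fs.contains (pvCat col "_unit") then d.insert col (pvCat col "_unit") else d).insert col (pvCat col "_units")
      else
        (if fs.contains (pvCat col "_unit") then d.insert col (pvCat col "_unit") else d)) d
    = (l.filter (pvCond fs)).foldl (fun d c => d.insert c (pvVal fs c)) d := by
  intro l
  induction l with
  | nil => intro d; rfl
  | cons c l ih =>
    intro d
    rw [List.foldl_cons]
    by_cases h1 : pvCat c "_unit" ∈ fs <;> by_cases h2 : pvCat c "_units" ∈ fs
    · rw [if_pos (by simpa using h2), if_pos (by simpa using h1), PySem.Dict.insert_insert_self,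
        List.filter_cons_of_pos (by simp [pvCond, h1]), List.foldl_cons,
        show pvVal fs c = pvCat c "_units" by simp [pvVal, h2]]
      exact ih _
    · rw [if_neg (by simpa using h2), if_pos (by simpa using h1),
        List.filter_cons_of_pos (by simp [pvCond, h1]), List.foldl_cons,
        show pvVal fs c = pvCat c "_unit" by simp [pvVal, h2]]
      exact ih _
    · rw [if_pos (by simpa using h2), if_neg (by simpa using h1),
        List.filter_cons_of_pos (by simp [pvCond, h2]), List.foldl_cons,
        show pvVal fs c = pvCat c "_units" by simp [pvVal, h2]]
      exact ih _
    · rw [if_neg (by simpa using h2), if_neg (by simpa using h1),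
        List.filter_cons_of_neg (by simp [pvCond, h1, h2])]
      exact ih _

-- lookup in an unconditional identity-keyed insert loop
lemma pv_get?_foldIns (fs : List String) : ∀ (l : List String) (d : PySem.Dict String String) (b : String),
    ((l.foldl (fun d c => d.insert c (pvVal fs c)) d).get? b)
    = if b ∈ l then some (pvVal fs b) else d.get? b := by
  intro l
  induction l with
  | nil => intro d b; simp
  | cons c l ih =>
    intro d b
    simp only [List.foldl_cons]
    rw [ih]
    by_cases hbl : b ∈ l
    · simp [hbl]
    · by_cases hbc : b = c
      · subst hbc; simp [hbl, PySem.Dict.get?_insert_self]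
      · simp [hbl, hbc, PySem.Dict.get?_insert_of_ne _ _ hbc]

-- a conditional keyed insert loop is the unconditional loop over the filtered list
lemma pv_foldl_if_insert (G : String → Bool) (k : String → String) :
    ∀ (l : List String) (d : PySem.Dict String String),
    l.foldl (fun d c => if G c then d.insert (k c) c else d) d
    = (l.filter G).foldl (fun d c => d.insert (k c) c) d := by
  intro l
  induction l with
  | nil => intro d; rfl
  | cons c l ih =>
    intro d
    by_cases h : G c <;> simp [h, ih]

-- lookup after one of B's suffix passes
lemma pv_get?_passB (P : String → Bool) (suf : String) (n : Int)
    (hn : n = -((suf.toList.length : Int))) (hk : 0 < suf.toList.length) :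
    ∀ (l : List String) (d0 : PySem.Dict String String) (b : String),
    ((l.foldl (fun d c =>
        if PySem.Str.endswith c suf && P (PySem.Str.slice c none (some n)) then
          d.insert (PySem.Str.slice c none (some n)) c else d) d0).get? b)
    = if pvCat b suf ∈ l ∧ P b = true then some (pvCat b suf) else d0.get? b := by
  intro l d0 b
  induction l using List.reverseRecOn with
  | nil => simp
  | append_singleton l x ih =>
    simp only [List.foldl_append, List.foldl_cons, List.foldl_nil]
    by_cases hx : x = pvCat b suf
    · obtain ⟨hend, hslice⟩ := (pv_strip_iff suf n hn hk x b).mpr hx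
      by_cases hPb : P b = true
      · rw [if_pos (by rw [hend, hslice, hPb]; rfl)]
        rw [hslice, PySem.Dict.get?_insert_self, hx]
        rw [if_pos ⟨by simp, hPb⟩]
      · have hPb' : P b = false := by simpa using hPb
        rw [if_neg (by rw [hend, hslice]; simp [hPb']), ih]
        simp [hPb']
    · have hxne : pvCat b suf ≠ x := fun h => hx h.symm
      have hmm : (pvCat b suf ∈ l ++ [x]) ↔ pvCat b suf ∈ l := by simp [hxne]
      by_cases hg : (PySem.Str.endswith x suf && P (PySem.Str.slice x none (some n))) = true
      · have hne : b ≠ PySem.Str.slice x none (some n) := by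
          intro heq
          exact hx ((pv_strip_iff suf n hn hk x b).mp
            ⟨((Bool.and_eq_true _ _).mp hg).1, heq.symm⟩)
        rw [if_pos hg, PySem.Dict.get?_insert_of_ne _ _ hne, ih]
        exact if_congr (and_congr_left' hmm.symm) rfl rfl
      · rw [if_neg hg, ih]
        exact if_congr (and_congr_left' hmm.symm) rfl rfl

-- the first-occurrence-index dictionary, characterised
lemma pv_get?_pos : ∀ (l : List String) (s : Int) (d : PySem.Dict String Int) (c : String),
    (((PySem.List.enumerate l s).foldl (fun d p => d.setdefault p.2 p.1) d).get? c)
    = if d.contains c then d.get? c else if c ∈ l then some (s + (l.idxOf c : Int)) else none := by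
  intro l
  induction l with
  | nil =>
    intro s d c
    simp only [PySem.List.enumerate_nil, List.foldl_nil]
    by_cases h : d.contains c
    · simp [h]
    · have : d.get? c = none := by
        rw [PySem.Dict.contains_eq_isSome_get?] at h
        exact Option.not_isSome_iff_eq_none.mp (by simp [h])
      simp [h, this]
  | cons x l ih =>
    intro s d c
    rw [PySem.List.enumerate_cons]
    simp only [List.foldl_cons]
    rw [ih]
    by_cases hcx : c = x
    · subst hcx
      have hcont : (d.setdefault c s).contains c = true := by
        rw [PySem.Dict.contains_setdefault]; simp
      rw [if_pos hcont, PySem.Dict.get?_setdefault_self]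
      by_cases hd : d.contains c
      · rw [PySem.Dict.contains_eq_isSome_get?] at hd
        obtain ⟨v, hv⟩ := Option.isSome_iff_exists.mp hd
        simp [hv, PySem.Dict.contains_eq_isSome_get?]
      · have hnone : d.get? c = none := by
          rw [PySem.Dict.contains_eq_isSome_get?] at hd
          exact Option.not_isSome_iff_eq_none.mp (by simp_all)
        simp [hd, hnone]
    · have hcont : (d.setdefault x s).contains c = d.contains c := by
        rw [PySem.Dict.contains_setdefault]
        simp [hcx]
      rw [hcont, PySem.Dict.get?_setdefault_of_ne d s hcx]
      by_cases hd : d.contains c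
      · simp [hd]
      · have hmem : (c ∈ x :: l) ↔ c ∈ l := by simp [hcx]
        simp only [if_neg (by simp [hd] : ¬ d.contains c = true)]
        by_cases hcl : c ∈ l
        · rw [if_pos (hmem.mpr hcl), if_pos hcl]
          have : (x :: l).idxOf c = l.idxOf c + 1 := by
            simp [Ne.symm hcx]
          rw [this]
          congr 1
          push_cast
          ring
        · rw [if_neg (fun h => hcl (hmem.mp h)), if_neg hcl]

-- membership in the stripped-bases list of a suffix pass
lemma pv_mem_map_strip (l : List String) (P : String → Bool) (suf : String) (n : Int)
    (hn : n = -((suf.toList.length : Int))) (hk : 0 < suf.toList.length) (b : String) :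
    (b ∈ (l.filter (fun c => PySem.Str.endswith c suf && P (PySem.Str.slice c none (some n)))).map
        (fun c => PySem.Str.slice c none (some n)))
    ↔ (pvCat b suf ∈ l ∧ P b = true) := by
  simp only [List.mem_map, List.mem_filter, Bool.and_eq_true]
  constructor
  · rintro ⟨c, ⟨hcl, hend, hP⟩, hslice⟩
    have hc := (pv_strip_iff suf n hn hk c b).mp ⟨hend, hslice⟩
    subst hc
    exact ⟨hcl, by rwa [hslice] at hP⟩
  · rintro ⟨hmem, hP⟩
    obtain ⟨hend, hslice⟩ := (pv_strip_iff suf n hn hk (pvCat b suf) b).mpr rfl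
    exact ⟨pvCat b suf, ⟨hmem, hend, by rwa [hslice]⟩, hslice⟩

-- set(xs) commutes with an element-determined filter
lemma pv_foldl_add_filter (p : String → Bool) : ∀ (l : List String) (s : List String),
    (l.filter p).foldl PySem.Set.add (s.filter p) = (l.foldl PySem.Set.add s).filter p := by
  intro l
  induction l with
  | nil => intro s; rfl
  | cons c l ih =>
    intro s
    by_cases hp : p c
    · have hadd : PySem.Set.add (s.filter p) c = (PySem.Set.add s c).filter p := by
        rw [PySem.Set.add_eq_ite, PySem.Set.add_eq_ite]
        by_cases hs : c ∈ s
        · simp [hs, List.mem_filter, hp]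
        · simp [hs, List.mem_filter, hp, List.filter_append]
      rw [List.filter_cons_of_pos hp, List.foldl_cons, List.foldl_cons, hadd, ih]
    · have hadd : (PySem.Set.add s c).filter p = s.filter p := by
        rw [PySem.Set.add_eq_ite]
        by_cases hs : c ∈ s
        · simp [hs]
        · simp [hs, List.filter_append, hp]
      rw [List.filter_cons_of_neg hp, List.foldl_cons, ← hadd, ih]

lemma pv_ofList_filter (p : String → Bool) (l : List String) :
    PySem.Set.ofList (l.filter p) = (PySem.Set.ofList l).filter p := by
  rw [PySem.Set.ofList_eq_foldl, PySem.Set.ofList_eq_foldl]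
  simpa using pv_foldl_add_filter p l []

-- set(xs) lists elements in strictly increasing first-occurrence order
lemma pv_pairwise_idxOf : ∀ (l : List String),
    (PySem.Set.ofList l).Pairwise (fun a b => l.idxOf a < l.idxOf b) := by
  intro l
  induction l using List.reverseRecOn with
  | nil => simp [PySem.Set.ofList_eq_foldl]
  | append_singleton l x ih =>
    have hof : PySem.Set.ofList (l ++ [x]) = PySem.Set.add (PySem.Set.ofList l) x := by
      rw [PySem.Set.ofList_eq_foldl, PySem.Set.ofList_eq_foldl, List.foldl_append]
      rfl
    rw [hof, PySem.Set.add_eq_ite]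
    by_cases hx : x ∈ PySem.Set.ofList l
    · rw [if_pos hx]
      refine ih.imp_of_mem ?_
      intro a b ha hb hab
      have ha' : a ∈ l := (PySem.Set.mem_ofList l a).mp ha
      have hb' : b ∈ l := (PySem.Set.mem_ofList l b).mp hb
      rwa [List.idxOf_append, if_pos ha', List.idxOf_append, if_pos hb']
    · rw [if_neg hx]
      have hxl : x ∉ l := fun h => hx ((PySem.Set.mem_ofList l x).mpr h)
      rw [List.pairwise_append]
      refine ⟨ih.imp_of_mem ?_, by simp, ?_⟩
      · intro a b ha hb hab
        have ha' : a ∈ l := (PySem.Set.mem_ofList l a).mp ha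
        have hb' : b ∈ l := (PySem.Set.mem_ofList l b).mp hb
        rwa [List.idxOf_append, if_pos ha', List.idxOf_append, if_pos hb']
      · intro a ha b hb
        have ha' : a ∈ l := (PySem.Set.mem_ofList l a).mp ha
        have hb' : b = x := by simpa using hb
        subst hb'
        rw [List.idxOf_append, if_pos ha', List.idxOf_append, if_neg hxl]
        calc l.idxOf a < l.length := List.idxOf_lt_length_of_mem ha'
          _ ≤ [b].idxOf b + l.length := by omega

-- updating a set with set(v) is updating it with v
lemma pv_update_ofList : ∀ (v : List String) (s : PySem.Set String),
    PySem.Set.update s (PySem.Set.ofList v) = PySem.Set.update s v := by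
  intro v
  induction v using List.reverseRecOn with
  | nil => intro s; rfl
  | append_singleton v x ih =>
    intro s
    have hof : PySem.Set.ofList (v ++ [x]) = PySem.Set.add (PySem.Set.ofList v) x := by
      rw [PySem.Set.ofList_eq_foldl, PySem.Set.ofList_eq_foldl, List.foldl_append]
      rfl
    rw [hof, PySem.Set.add_eq_ite]
    by_cases hx : x ∈ PySem.Set.ofList v
    · rw [if_pos hx, ih]
      have hxv : x ∈ v := (PySem.Set.mem_ofList v x).mp hx
      show PySem.Set.update s v = (v ++ [x]).foldl PySem.Set.add s
      rw [List.foldl_append]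
      show PySem.Set.update s v = PySem.Set.add (PySem.Set.update s v) x
      rw [PySem.Set.add_eq_ite, if_pos ((PySem.Set.mem_update s v x).mpr (Or.inr hxv))]
    · rw [if_neg hx]
      show (PySem.Set.ofList v ++ [x]).foldl PySem.Set.add s = (v ++ [x]).foldl PySem.Set.add s
      rw [List.foldl_append, List.foldl_append]
      show PySem.Set.add (PySem.Set.update s (PySem.Set.ofList v)) x
        = PySem.Set.add (PySem.Set.update s v) x
      rw [ih]

-- the central fact: A's dict equals B's dict (written let-free, as zeta-reduction leaves them)
lemma pv_dicts_eq (fs : List String) :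
    (fs.foldl (fun d col =>
      if fs.contains (pvCat col "_units") then
        (if fs.contains (pvCat col "_unit") then d.insert col (pvCat col "_unit") else d).insert col (pvCat col "_units")
      else
        (if fs.contains (pvCat col "_unit") then d.insert col (pvCat col "_unit") else d))
      PySem.Dict.empty)
    = PySem.Dict.ofList (PySem.List.sorted
        (fs.foldl (fun d col =>
          if PySem.Str.endswith col "_units" &&
              ((PySem.List.enumerate fs).foldl (fun d p => d.setdefault p.2 p.1)
                PySem.Dict.empty).contains (PySem.Str.slice col none (some (-6))) then
            d.insert (PySem.Str.slice col none (some (-6))) col else d)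
          (fs.foldl (fun d col =>
            if PySem.Str.endswith col "_unit" &&
                ((PySem.List.enumerate fs).foldl (fun d p => d.setdefault p.2 p.1)
                  PySem.Dict.empty).contains (PySem.Str.slice col none (some (-5))) then
              d.insert (PySem.Str.slice col none (some (-5))) col else d) PySem.Dict.empty)).items
        (fun kv => ((PySem.List.enumerate fs).foldl (fun d p => d.setdefault p.2 p.1)
          PySem.Dict.empty).getD kv.1 0)) := by
  set pos := (PySem.List.enumerate fs).foldl (fun d p => d.setdefault p.2 p.1)
    (PySem.Dict.empty : PySem.Dict String Int) with hposdef
  have hpos : ∀ c, pos.get? c = if c ∈ fs then some ((fs.idxOf c : Int)) else none := by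
    intro c
    rw [hposdef, pv_get?_pos]
    simp [PySem.Dict.contains_empty]
  have hposc : ∀ c, pos.contains c = decide (c ∈ fs) := by
    intro c
    rw [PySem.Dict.contains_eq_isSome_get?, hpos c]
    by_cases h : c ∈ fs <;> simp [h]
  have hposD : ∀ c, c ∈ fs → pos.getD c 0 = (fs.idxOf c : Int) := by
    intro c hc
    show (pos.get? c).getD 0 = _
    rw [hpos c, if_pos hc]
    rfl
  set m1 := fs.foldl (fun d col =>
      if PySem.Str.endswith col "_unit" && pos.contains (PySem.Str.slice col none (some (-5))) then
        d.insert (PySem.Str.slice col none (some (-5))) col else d)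
    (PySem.Dict.empty : PySem.Dict String String) with hm1def
  set B2 := fs.foldl (fun d col =>
      if PySem.Str.endswith col "_units" && pos.contains (PySem.Str.slice col none (some (-6))) then
        d.insert (PySem.Str.slice col none (some (-6))) col else d) m1 with hB2def
  have hB2get : ∀ b, B2.get? b =
      if b ∈ fs.filter (pvCond fs) then some (pvVal fs b) else none := by
    intro b
    rw [hB2def, pv_get?_passB (fun s => pos.contains s) "_units" (-6) (by decide) (by decide) fs m1 b,
      hm1def, pv_get?_passB (fun s => pos.contains s) "_unit" (-5) (by decide) (by decide) fs PySem.Dict.empty b]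
    simp only [PySem.Dict.get?_empty, hposc]
    by_cases h1 : pvCat b "_unit" ∈ fs <;> by_cases h2 : pvCat b "_units" ∈ fs <;>
      by_cases hb : b ∈ fs <;>
      simp [pvVal, pvCond, List.mem_filter, h1, h2, hb]
  have hnodup : B2.keys.Nodup := by
    rw [hB2def, hm1def, pv_foldl_if_insert, pv_foldl_if_insert]
    exact PySem.Dict.nodup_keys_foldl_insert_key _ _ _ _
      (PySem.Dict.nodup_keys_foldl_insert_key _ _ _ _
        (show (PySem.Dict.empty : PySem.Dict String String).keys.Nodup from List.nodup_nil))
  have hmemkeys : ∀ b, b ∈ B2.keys ↔ b ∈ PySem.Set.ofList (fs.filter (pvCond fs)) := by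
    intro b
    rw [hB2def, hm1def, pv_foldl_if_insert, pv_foldl_if_insert,
      PySem.Dict.keys_foldl_insert_key _ (fun c => PySem.Str.slice c none (some (-6))) (fun _ c => c),
      PySem.Dict.keys_foldl_insert_key _ (fun c => PySem.Str.slice c none (some (-5))) (fun _ c => c),
      PySem.Set.mem_update, PySem.Set.mem_update,
      pv_mem_map_strip fs (fun s => pos.contains s) "_unit" (-5) (by decide) (by decide) b,
      pv_mem_map_strip fs (fun s => pos.contains s) "_units" (-6) (by decide) (by decide) b,
      PySem.Set.mem_ofList]
    simp only [hposc]
    by_cases h1 : pvCat b "_unit" ∈ fs <;> by_cases h2 : pvCat b "_units" ∈ fs <;>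
      by_cases hb : b ∈ fs <;>
      simp [pvCond, List.mem_filter, h1, h2, hb, PySem.Dict.keys, PySem.Dict.empty]
  have hperm : (PySem.Set.ofList (fs.filter (pvCond fs))).Perm B2.keys :=
    (List.perm_ext_iff_of_nodup (PySem.Set.nodup_ofList _) hnodup).mpr
      (fun a => (hmemkeys a).symm)
  have hTperm : ((PySem.Set.ofList (fs.filter (pvCond fs))).map
      (fun b => (b, pvVal fs b))).Perm B2.items := by
    rw [PySem.Dict.items_eq_map_keys B2 hnodup ""]
    have hmapeq : B2.keys.map (fun k => (k, B2.getD k ""))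
        = B2.keys.map (fun b => (b, pvVal fs b)) := by
      apply List.map_congr_left
      intro k hk
      have hkf : k ∈ fs.filter (pvCond fs) :=
        (PySem.Set.mem_ofList _ _).mp ((hmemkeys k).mp hk)
      have hval : B2.getD k "" = pvVal fs k := by
        show (B2.get? k).getD "" = _
        rw [hB2get k, if_pos hkf]
        rfl
      rw [hval]
    rw [hmapeq]
    exact hperm.map _
  have hTpair : (((PySem.Set.ofList (fs.filter (pvCond fs))).map
      (fun b => (b, pvVal fs b)))).Pairwise
      (fun p q => pos.getD p.1 0 < pos.getD q.1 0) := by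
    rw [List.pairwise_map]
    have hbase := (pv_pairwise_idxOf fs).filter (pvCond fs)
    rw [← pv_ofList_filter] at hbase
    refine hbase.imp_of_mem ?_
    intro a b ha hb hab
    have ha' : a ∈ fs := (List.mem_filter.mp ((PySem.Set.mem_ofList _ _).mp ha)).1
    have hb' : b ∈ fs := (List.mem_filter.mp ((PySem.Set.mem_ofList _ _).mp hb)).1
    simp only [hposD a ha', hposD b hb']
    exact_mod_cast hab
  have hsorted : PySem.List.sorted B2.items (fun kv => pos.getD kv.1 0)
      = (PySem.Set.ofList (fs.filter (pvCond fs))).map (fun b => (b, pvVal fs b)) :=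
    PySem.List.sorted_eq_of_perm_of_pairwise_lt _ _ _ hTperm hTpair
  have hofT : (PySem.Dict.ofList ((PySem.Set.ofList (fs.filter (pvCond fs))).map
      (fun b => (b, pvVal fs b)))).items
      = (PySem.Set.ofList (fs.filter (pvCond fs))).map (fun b => (b, pvVal fs b)) := by
    show (((PySem.Set.ofList (fs.filter (pvCond fs))).map (fun b => (b, pvVal fs b))).foldl
      (fun acc p => acc.insert p.1 p.2) PySem.Dict.empty).items = _
    have hnd : (((PySem.Set.ofList (fs.filter (pvCond fs))).map (fun b => (b, pvVal fs b))).map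
        (fun p : String × String => p.1)).Nodup := by
      rw [List.map_map,
        show ((fun p : String × String => p.1) ∘ fun b => (b, pvVal fs b)) = id from rfl,
        List.map_id]
      exact PySem.Set.nodup_ofList _
    have h := PySem.Dict.items_foldl_insert_fresh
      ((PySem.Set.ofList (fs.filter (pvCond fs))).map (fun b => (b, pvVal fs b)))
      (fun p : String × String => p.1) (fun p : String × String => p.2) PySem.Dict.empty
      (fun a _ => PySem.Dict.contains_empty _) hnd
    simpa [PySem.Dict.empty] using h
  have hAitems : ((fs.filter (pvCond fs)).foldl
      (fun d c => d.insert c (pvVal fs c)) PySem.Dict.empty).items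
      = (PySem.Set.ofList (fs.filter (pvCond fs))).map (fun b => (b, pvVal fs b)) := by
    have hAnodup : ((fs.filter (pvCond fs)).foldl
        (fun d c => d.insert c (pvVal fs c)) PySem.Dict.empty).keys.Nodup :=
      PySem.Dict.nodup_keys_foldl_insert _ _ _
        (show (PySem.Dict.empty : PySem.Dict String String).keys.Nodup from List.nodup_nil)
    rw [PySem.Dict.items_eq_map_keys _ hAnodup ""]
    have hkeysA : ((fs.filter (pvCond fs)).foldl
        (fun d c => d.insert c (pvVal fs c)) PySem.Dict.empty).keys
        = PySem.Set.ofList (fs.filter (pvCond fs)) := by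
      rw [PySem.Dict.keys_foldl_insert, PySem.Set.ofList_eq_foldl]
      rfl
    rw [hkeysA]
    apply List.map_congr_left
    intro k hk
    have hkf : k ∈ fs.filter (pvCond fs) := (PySem.Set.mem_ofList _ _).mp hk
    have hval : ((fs.filter (pvCond fs)).foldl
        (fun d c => d.insert c (pvVal fs c)) PySem.Dict.empty).getD k "" = pvVal fs k := by
      show (((fs.filter (pvCond fs)).foldl
        (fun d c => d.insert c (pvVal fs c)) PySem.Dict.empty).get? k).getD "" = _
      rw [pv_get?_foldIns fs (fs.filter (pvCond fs)) PySem.Dict.empty k, if_pos hkf]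
      rfl
    rw [hval]
  apply PySem.Dict.ext
  rw [pv_foldA fs fs PySem.Dict.empty, hAitems, hsorted, hofT]

-- ===== VERDICT (by name: the statement is the Claim_ definition above) =====
theorem get_additional_faire_unit_cols_dict_spec : Claim_equal_get_additional_faire_unit_cols_dict := by
  intro fs _
  unfold Spec_get_additional_faire_unit_cols_dict
  unfold get_additional_faire_unit_cols_dict get_additional_faire_unit_cols_dict_alt
  simp only [pv_dicts_eq fs, PySem.Set.union, pv_update_ofList]
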